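-- pv_equiv track=rewrite | github.com/Flanker35B/codewars | 6 kyu/ House of cards.py | house_of_cards
-- ===== SOURCE A (Python) =====
-- def house_of_cards(floors):
--     if floors>=1:
--         tc=2
--         pc=2
--         for i in range(0,floors):
--             pc+=3
--             tc+=pc
--         return tc
--     else:
--         raise Error
-- ===== SOURCE B (Python) =====
-- def house_of_cards(floors):
--     if floors < 1:
--         raise ValueError("floors must be at least 1")
--     return floors * (3 * floors + 7) // 2 + 2
-- ===== Notes on version B (the rewrite author's own statement) =====
-- stated objective: faster
-- what changed: Replaced the O(floors) accumulation loop with the closed-form arithmetic-series formula floors*(3*floors+7)//2 + 2.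
import Mathlib
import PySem

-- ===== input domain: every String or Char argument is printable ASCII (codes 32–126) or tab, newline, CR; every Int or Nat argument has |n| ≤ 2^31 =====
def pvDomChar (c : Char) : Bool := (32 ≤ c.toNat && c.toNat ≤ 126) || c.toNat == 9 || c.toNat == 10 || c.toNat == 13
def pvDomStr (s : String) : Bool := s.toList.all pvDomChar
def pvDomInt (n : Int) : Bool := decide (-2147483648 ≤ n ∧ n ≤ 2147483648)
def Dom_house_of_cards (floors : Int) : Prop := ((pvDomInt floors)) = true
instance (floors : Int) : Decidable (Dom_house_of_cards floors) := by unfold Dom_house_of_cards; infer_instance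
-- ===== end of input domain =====

-- B replaces A's O(floors) accumulation loop with the closed-form formula floors*(3*floors+7)//2 + 2 (O(1)).

-- ===== PORT A =====
-- For floors < 1 the Python A raises (NameError: 'Error'); that branch is outside Pre_ (port returns 0 there).
def house_of_cards (floors : Int) : Int :=
  if floors ≥ 1 then
    ((PySem.List.pyRange 0 floors 1).foldl
      (fun (s : Int × Int) _ => (s.1 + (s.2 + 3), s.2 + 3)) (2, 2)).1
  else 0

-- ===== PORT B =====
-- For floors < 1 the Python B raises ValueError; outside Pre_ (port returns 0 there).
def house_of_cards_alt (floors : Int) : Int :=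
  if floors < 1 then 0
  else PySem.Int.floordiv (floors * (3 * floors + 7)) 2 + 2

-- ===== PRECONDITION & SPEC =====
-- Pre_: both Pythons raise for floors < 1 (A a NameError, B a ValueError); exactly floors ≥ 1 is accepted.
def Pre_house_of_cards (floors : Int) : Prop := 1 ≤ floors
instance (floors : Int) : Decidable (Pre_house_of_cards floors) := by unfold Pre_house_of_cards; infer_instance
def pvWitness_house_of_cards : Int := (5)

def Spec_house_of_cards (floors : Int) (out : Int) : Prop := out = house_of_cards_alt floors
instance (floors : Int) (out : Int) : Decidable (Spec_house_of_cards floors out) := by unfold Spec_house_of_cards; infer_instance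

-- ===== CLAIM (what is proved, stated in full; the proofs are below) =====
def Claim_equal_house_of_cards : Prop := ∀ (floors : Int), Dom_house_of_cards floors → Pre_house_of_cards floors → Spec_house_of_cards floors (house_of_cards floors)

-- ===== LEMMAS AND PROOFS =====

-- A's loop body ignores the range element; after n iterations pc has grown by 3*n and
-- tc by n*pc₀ + 3*(1+2+⋯+n).
theorem hoc_loop (l : List Int) (tc pc : Int) :
    l.foldl (fun (s : Int × Int) _ => (s.1 + (s.2 + 3), s.2 + 3)) (tc, pc) =
      (tc + (l.length : Int) * pc + 3 * ((l.length * (l.length + 1) / 2 : Nat) : Int),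
       pc + 3 * (l.length : Int)) := by
  induction l generalizing tc pc with
  | nil => simp
  | cons a rest ih =>
    simp only [List.foldl_cons, ih, List.length_cons, Prod.mk.injEq]
    refine ⟨?_, by push_cast; ring⟩
    have h1 : rest.length * (rest.length + 1) % 2 = 0 := Nat.even_iff.mp (Nat.even_mul_succ_self rest.length)
    have h2 : (rest.length + 1) * (rest.length + 1 + 1) % 2 = 0 := Nat.even_iff.mp (Nat.even_mul_succ_self (rest.length + 1))
    have e1 : (2 : Int) * ((rest.length * (rest.length + 1) / 2 : Nat) : Int) = (rest.length : Int) * ((rest.length : Int) + 1) := by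
      exact_mod_cast congrArg (Nat.cast : Nat → Int) (by omega : 2 * (rest.length * (rest.length + 1) / 2) = rest.length * (rest.length + 1))
    have e2 : (2 : Int) * (((rest.length + 1) * (rest.length + 1 + 1) / 2 : Nat) : Int) = ((rest.length : Int) + 1) * ((rest.length : Int) + 2) := by
      exact_mod_cast congrArg (Nat.cast : Nat → Int) (by omega : 2 * ((rest.length + 1) * (rest.length + 1 + 1) / 2) = (rest.length + 1) * (rest.length + 1 + 1))
    have hc : ((rest.length + 1 : Nat) : Int) = (rest.length : Int) + 1 := by push_cast; ring
    rw [hc]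
    nlinarith [e1, e2]

theorem house_of_cards_spec : Claim_equal_house_of_cards := by
  intro floors _ hpre
  unfold Pre_house_of_cards at hpre
  unfold Spec_house_of_cards house_of_cards house_of_cards_alt
  rw [if_pos (by omega), if_neg (by omega)]
  rw [hoc_loop]
  rw [PySem.Int.floordiv_eq_ediv_of_pos (by norm_num)]
  simp only [PySem.List.length_pyRange_one]
  set n : Nat := (floors - 0).toNat with hn
  have hf : floors = (n : Int) := by omega
  have hmod : n * (n + 1) % 2 = 0 := Nat.even_iff.mp (Nat.even_mul_succ_self n)
  have e1 : (2 : Int) * ((n * (n + 1) / 2 : Nat) : Int) = (n : Int) * ((n : Int) + 1) := by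
    exact_mod_cast congrArg (Nat.cast : Nat → Int) (by omega : 2 * (n * (n + 1) / 2) = n * (n + 1))
  rw [hf]
  have hdvd : (2 : Int) ∣ (n : Int) * (3 * (n : Int) + 7) := by
    rcases Int.even_or_odd (n : Int) with ⟨k, hk⟩ | ⟨k, hk⟩
    · exact ⟨k * (3 * (n : Int) + 7), by rw [hk]; ring⟩
    · exact ⟨(n : Int) * (3 * k + 5), by rw [hk]; ring⟩
  obtain ⟨q, hq⟩ := hdvd
  rw [hq]
  rw [Int.mul_ediv_cancel_left q (by norm_num)]
  nlinarith [e1, hq]
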